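-- pv_equiv track=rewrite | github.com/MatteoLacki/pep2prot | pep2prot/graph_ops.py | graph_is_lexicographically_sorted
-- ===== SOURCE A (Python) =====
-- from math import inf
--
-- def graph_is_lexicographically_sorted(edges: list[int, int]) -> bool:
--     a_prev = -inf
--     b_prev = -inf
--     for a, b in edges:
--         if a < a_prev or (a == a_prev and b < b_prev):
--             return False
--         a_prev = a
--         b_prev = b
--     return True
-- ===== SOURCE B (Python) =====
-- def graph_is_lexicographically_sorted(edges: list) -> bool:
--     return edges == sorted(edges)
-- ===== Notes on version B (the rewrite author's own statement) =====
-- stated objective: idiomatic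
-- what changed: Replaces the forward scan with previous-element sentinels by a sort-then-compare: B returns edges == sorted(edges), relying on Python's lexicographic tuple ordering.
import Mathlib
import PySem

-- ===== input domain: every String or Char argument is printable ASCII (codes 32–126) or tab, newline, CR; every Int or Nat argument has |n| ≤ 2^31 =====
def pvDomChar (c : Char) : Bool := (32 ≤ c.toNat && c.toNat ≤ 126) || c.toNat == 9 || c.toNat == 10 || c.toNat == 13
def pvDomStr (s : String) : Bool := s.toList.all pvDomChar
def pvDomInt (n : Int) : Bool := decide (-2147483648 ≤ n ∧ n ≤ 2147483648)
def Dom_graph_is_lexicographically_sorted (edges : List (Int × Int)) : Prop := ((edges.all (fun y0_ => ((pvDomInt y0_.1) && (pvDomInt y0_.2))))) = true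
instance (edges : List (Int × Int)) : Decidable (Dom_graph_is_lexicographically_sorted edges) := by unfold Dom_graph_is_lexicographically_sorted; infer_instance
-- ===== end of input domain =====

-- B is the idiomatic sort-then-compare: edges == sorted(edges); A's single scan is reproduced exactly.

-- ===== PORT A =====
-- A's loop, with the previous pair carried along; Python's (-inf, -inf) sentinel is `none`
-- (exact: -inf is strictly below every int, so the test can never fire on the first edge).
def pvGoA : Option (Int × Int) → List (Int × Int) → Bool
  | _, [] => true
  | prev, (a, b) :: rest =>
    match prev with
    | some (ap, bp) =>
      if a < ap ∨ (a = ap ∧ b < bp) then false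
      else pvGoA (some (a, b)) rest
    | none => pvGoA (some (a, b)) rest

def graph_is_lexicographically_sorted (edges : List (Int × Int)) : Bool :=
  pvGoA none edges

-- ===== PORT B =====
-- Source B: return edges == sorted(edges); sorted(list of 2-tuples) is PySem.List.sorted2 with the two projections.
def graph_is_lexicographically_sorted_alt (edges : List (Int × Int)) : Bool :=
  edges == PySem.List.sorted2 edges (fun p => p.1) (fun p => p.2) false

-- ===== PRECONDITION & SPEC =====
def Spec_graph_is_lexicographically_sorted (edges : List (Int × Int)) (out : Bool) : Prop := out = graph_is_lexicographically_sorted_alt edges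
instance (edges : List (Int × Int)) (out : Bool) : Decidable (Spec_graph_is_lexicographically_sorted edges out) := by unfold Spec_graph_is_lexicographically_sorted; infer_instance

-- ===== CLAIM (what is proved, stated in full; the proofs are below) =====
def Claim_equal_graph_is_lexicographically_sorted : Prop := ∀ (edges : List (Int × Int)), Dom_graph_is_lexicographically_sorted edges → Spec_graph_is_lexicographically_sorted edges (graph_is_lexicographically_sorted edges)

-- ===== LEMMAS AND PROOFS =====

-- sorted2 with the two projections is sorted with the lexicographic key: their comparison booleans agree.
theorem pv_sorted2_eq_sorted_lex (xs : List (Int × Int)) :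
    PySem.List.sorted2 xs (fun p => p.1) (fun p => p.2) false
      = PySem.List.sorted xs (fun p => toLex p) false := by
  unfold PySem.List.sorted2 PySem.List.sorted
  simp only [if_neg (by decide : ¬ (false = true))]
  congr 1
  funext acc x
  congr 1
  funext a b
  rw [Bool.eq_iff_iff]
  simp only [Bool.or_eq_true, Bool.and_eq_true, Bool.not_eq_eq_eq_not,
    Bool.not_true, decide_eq_true_eq, decide_eq_false_iff_not, Prod.Lex.toLex_lt_toLex]
  omega

-- A's scan, started after having seen pair p, accepts exactly the chains p :: xs that are lex-pairwise-≤.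
theorem pvGoA_some (xs : List (Int × Int)) :
    ∀ p : Int × Int, pvGoA (some p) xs = true
      ↔ (p :: xs).Pairwise (fun a b : Int × Int => toLex a ≤ toLex b) := by
  induction xs with
  | nil => intro p; simp [pvGoA]
  | cons hd tl ih =>
    rintro ⟨ap, bp⟩
    obtain ⟨a, b⟩ := hd
    by_cases h : a < ap ∨ (a = ap ∧ b < bp)
    · simp only [pvGoA, if_pos h]
      constructor
      · intro hf; exact absurd hf (by simp)
      · intro hp
        exfalso
        have h1 : toLex ((ap, bp) : Int × Int) ≤ toLex (a, b) :=
          (List.pairwise_cons.mp hp).1 _ (by simp)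
        rw [Prod.Lex.toLex_le_toLex] at h1
        simp only at h1
        omega
    · simp only [pvGoA, if_neg h]
      rw [ih]
      have hle : toLex ((ap, bp) : Int × Int) ≤ toLex (a, b) := by
        rw [Prod.Lex.toLex_le_toLex]; simp only; omega
      constructor
      · intro hp
        refine List.pairwise_cons.mpr ⟨?_, hp⟩
        intro q hq
        rcases List.mem_cons.mp hq with hq | hq
        · rw [hq]; exact hle
        · exact le_trans hle ((List.pairwise_cons.mp hp).1 q hq)
      · intro hp
        exact (List.pairwise_cons.mp hp).2

theorem pvGoA_none (xs : List (Int × Int)) :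
    pvGoA none xs = true ↔ xs.Pairwise (fun a b : Int × Int => toLex a ≤ toLex b) := by
  cases xs with
  | nil => simp [pvGoA]
  | cons hd tl =>
    obtain ⟨a, b⟩ := hd
    simpa [pvGoA] using pvGoA_some tl (a, b)

theorem graph_is_lexicographically_sorted_spec : Claim_equal_graph_is_lexicographically_sorted := by
  unfold Claim_equal_graph_is_lexicographically_sorted
  intro edges _
  unfold Spec_graph_is_lexicographically_sorted
  unfold graph_is_lexicographically_sorted graph_is_lexicographically_sorted_alt
  rw [pv_sorted2_eq_sorted_lex]
  rw [Bool.eq_iff_iff, pvGoA_none, beq_iff_eq]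
  constructor
  · intro hp
    exact (PySem.List.sorted_eq_self_of_pairwise edges (fun p => toLex p) hp).symm
  · intro he
    rw [he]
    exact PySem.List.sorted_pairwise edges (fun p => toLex p)
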